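-- pv_equiv track=rewrite | github.com/shubham2704/competetive_coding | codejam/Qualification Round 2021/reverseSortEngineer.py | operationL
-- ===== SOURCE A (Python) =====
-- def operationL(n, p):
--     if p < n-1:
--         return []
--     l = []
--     t = 0
--     c = 1
--     for i in range(n-1, 0, -1):
--         c += 1
--
--         if t+c+i-1 >= p:
--             r = p-t-i+1
--             l.append(r)
--             for k in range(i-1):
--                 l.append(1)
--             t = p
--             break
--
--         t += c
--         l.append(c)
--     if t<p:
--         return []
--     return l
-- ===== SOURCE B (Python) =====
-- def operationL(n, p):
--     # guards: need at least 2 elements, cost at least n-1 and at most n*(n+1)//2 - 1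
--     if n < 2 or p < n - 1 or p > n * (n + 1) // 2 - 1:
--         return []
--     m = p - n
--     # binary search for the unique j in [0, n-2] with j*(j+3)//2 >= m and (j == 0 or (j-1)*(j+2)//2 < m)
--     lo, hi = 0, n - 2
--     while lo < hi:
--         mid = (lo + hi) // 2
--         if mid * (mid + 3) // 2 >= m:
--             hi = mid
--         else:
--             lo = mid + 1
--     j = lo
--     r = p - j - j * (j - 1) // 2 - n + 2
--     return list(range(2, j + 2)) + [r] + [1] * (n - 2 - j)
-- ===== Notes on version B (the rewrite author's own statement) =====
-- stated objective: alternative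
-- what changed: A's accumulate-and-break linear scan is replaced by explicit feasibility guards, an O(log n) binary search for the break index j, and direct construction of the output as range(2,j+2) + [r] + [1]*(n-2-j).
import Mathlib
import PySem

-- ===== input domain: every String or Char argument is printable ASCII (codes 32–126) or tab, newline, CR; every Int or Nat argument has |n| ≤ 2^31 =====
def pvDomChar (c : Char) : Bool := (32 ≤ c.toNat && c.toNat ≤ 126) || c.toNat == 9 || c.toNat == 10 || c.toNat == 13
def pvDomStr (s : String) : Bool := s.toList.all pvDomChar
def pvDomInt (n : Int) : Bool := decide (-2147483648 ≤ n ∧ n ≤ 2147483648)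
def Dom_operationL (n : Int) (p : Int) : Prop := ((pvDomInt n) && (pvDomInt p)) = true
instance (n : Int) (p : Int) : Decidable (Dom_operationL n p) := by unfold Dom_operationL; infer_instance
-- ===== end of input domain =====

-- B replaces A's accumulate-and-break scan by explicit feasibility guards, a binary
-- search for the break index and a direct construction of the output list (alternative decomposition).

-- ===== PORT A =====
-- the loop body of A: iterates over the descending range, with the `break` modelled
-- by returning early; carries (l, t, c); on break t is set to p as in A
def opAloopA (p : Int) : List Int → List Int → Int → Int → (List Int × Int)
  | [], l, t, _ => (l, t)
  | i :: rest, l, t, c =>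
      if t + (c+1) + i - 1 ≥ p then
        -- `for k in range(i-1): l.append(1)` appends max(i-1,0) ones
        (l ++ [p - t - i + 1] ++ List.replicate (i-1).toNat 1, p)
      else opAloopA p rest (l ++ [c+1]) (t + (c+1)) (c+1)

def operationL (n : Int) (p : Int) : List Int :=
  if p < n - 1 then []
  else
    let res := opAloopA p (PySem.List.pyRange (n-1) 0 (-1)) [] 0 1
    if res.2 < p then [] else res.1

-- ===== PORT B =====
-- the `while lo < hi` loop of B's binary search; the fuel argument (gap size, supplied
-- below) is a pure totality device: it shrinks by at least one per iteration and the
-- loop exits on its own when lo >= hi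
def opBgo (m : Int) : Nat → Int → Int → Int
  | 0, lo, _ => lo
  | fuel+1, lo, hi =>
    if lo < hi then
      let mid := PySem.Int.floordiv (lo + hi) 2
      if m ≤ PySem.Int.floordiv (mid * (mid + 3)) 2 then opBgo m fuel lo mid
      else opBgo m fuel (mid + 1) hi
    else lo

-- binary search: smallest j in [lo, hi] with m <= j*(j+3)//2 (caller guarantees it exists at hi)
def opBsearch (m : Int) (lo hi : Int) : Int := opBgo m (hi - lo).toNat lo hi

def operationL_alt (n : Int) (p : Int) : List Int :=
  if n < 2 ∨ p < n - 1 ∨ p > PySem.Int.floordiv (n*(n+1)) 2 - 1 then []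
  else
    let m := p - n
    let j := opBsearch m 0 (n-2)
    let r := p - j - PySem.Int.floordiv (j*(j-1)) 2 - n + 2
    PySem.List.pyRange 2 (j+2) 1 ++ [r] ++ List.replicate (n-2-j).toNat 1

-- ===== PRECONDITION & SPEC =====
def Spec_operationL (n : Int) (p : Int) (out : List Int) : Prop := out = operationL_alt n p
instance (n : Int) (p : Int) (out : List Int) : Decidable (Spec_operationL n p out) := by unfold Spec_operationL; infer_instance

-- ===== CLAIM (what is proved, stated in full; the proofs are below) =====
def Claim_equal_operationL : Prop := ∀ (n : Int) (p : Int), Dom_operationL n p → Spec_operationL n p (operationL n p)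

-- ===== LEMMAS AND PROOFS =====

-- F j = 2 + 3 + ... + (j+1) = j*(j+3)/2, the accumulator t of A after j non-breaking steps
def F : Nat → Int
  | 0 => 0
  | j+1 => F j + (j+2)

theorem two_mul_F (j : Nat) : 2 * F j = (j : Int) * (j + 3) := by
  induction j with
  | zero => simp [F]
  | succ j ih => simp only [F]; push_cast; push_cast at ih; nlinarith [ih]

theorem F_mono {a b : Nat} (h : a ≤ b) : F a ≤ F b := by
  induction b with
  | zero => simp_all
  | succ b ih =>
    rcases Nat.lt_or_ge a (b+1) with h' | h'
    · have := ih (by omega); simp only [F]; omega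
    · have : a = b + 1 := by omega
      subst this; exact le_refl _

theorem floordiv_F (x : Int) (hx : 0 ≤ x) : PySem.Int.floordiv (x * (x + 3)) 2 = F x.toNat := by
  have h2 : 2 * F x.toNat = x * (x + 3) := by
    have := two_mul_F x.toNat
    rwa [Int.toNat_of_nonneg hx] at this
  rw [PySem.Int.floordiv_eq_ediv_of_pos (by omega)]
  omega

theorem floordiv_G (x : Int) (hx : 0 ≤ x) : PySem.Int.floordiv (x * (x - 1)) 2 = F x.toNat - 2*x := by
  have h2 : 2 * F x.toNat = x * (x + 3) := by
    have := two_mul_F x.toNat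
    rwa [Int.toNat_of_nonneg hx] at this
  have h3 : x * (x - 1) = 2 * F x.toNat - 4 * x := by nlinarith [h2]
  rw [PySem.Int.floordiv_eq_ediv_of_pos (by omega)]
  omega

theorem pvMid (lo hi : Int) (h : lo < hi) :
    lo ≤ PySem.Int.floordiv (lo + hi) 2 ∧ PySem.Int.floordiv (lo + hi) 2 < hi := by
  rw [PySem.Int.floordiv_eq_ediv_of_pos (by omega)]; omega

theorem opBgo_spec (m : Int) : ∀ (fuel : Nat) (lo hi : Int), (hi - lo).toNat ≤ fuel →
    0 ≤ lo → lo ≤ hi →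
    m ≤ F hi.toNat → (lo = 0 ∨ F (lo - 1).toNat < m) →
    lo ≤ opBgo m fuel lo hi ∧ opBgo m fuel lo hi ≤ hi ∧ m ≤ F (opBgo m fuel lo hi).toNat ∧
      (opBgo m fuel lo hi = 0 ∨ F (opBgo m fuel lo hi - 1).toNat < m) := by
  intro fuel
  induction fuel with
  | zero =>
    intro lo hi hf h0 hle hhi hlo
    have : lo = hi := by omega
    subst this
    exact ⟨le_refl _, le_refl _, hhi, hlo⟩
  | succ fuel ih =>
    intro lo hi hf h0 hle hhi hlo
    rw [opBgo]
    by_cases hlt : lo < hi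
    · simp only [hlt, if_true]
      have hb := pvMid lo hi hlt
      set mid := PySem.Int.floordiv (lo + hi) 2 with hmid
      have hmid0 : 0 ≤ mid := by omega
      rw [floordiv_F mid hmid0]
      by_cases hc : m ≤ F mid.toNat
      · simp only [hc, if_true]
        obtain ⟨ha, hb', hc', hd'⟩ := ih lo mid (by omega) h0 (by omega) hc hlo
        exact ⟨ha, by omega, hc', hd'⟩
      · simp only [hc, if_false]
        obtain ⟨ha, hb', hc', hd'⟩ := ih (mid+1) hi (by omega) (by omega) (by omega) hhi
          (Or.inr (by simp only [add_sub_cancel_right]; omega))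
        exact ⟨by omega, hb', hc', hd'⟩
    · simp only [hlt, if_false]
      have : lo = hi := by omega
      subst this
      exact ⟨le_refl _, le_refl _, hhi, hlo⟩

theorem opBsearch_spec (m : Int) (lo hi : Int) (h0 : 0 ≤ lo) (hle : lo ≤ hi)
    (hhi : m ≤ F hi.toNat) (hlo : lo = 0 ∨ F (lo - 1).toNat < m) :
    lo ≤ opBsearch m lo hi ∧ opBsearch m lo hi ≤ hi ∧ m ≤ F (opBsearch m lo hi).toNat ∧
      (opBsearch m lo hi = 0 ∨ F (opBsearch m lo hi - 1).toNat < m) :=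
  opBgo_spec m (hi - lo).toNat lo hi (le_refl _) h0 hle hhi hlo

-- A's loop run from step j (j steps already taken, t = F j, c = j+1, remaining range n-1-j .. 1),
-- when the break fires exactly at step J (the minimal index with p ≤ F J + n)
theorem loopA_break (n p : Int) (J : Nat) (hJ : (J : Int) ≤ n - 2)
    (hbrk : p ≤ F J + n) (hmin : ∀ k : Nat, k < J → F k + n < p) :
    ∀ (j : Nat) (L : List Int), j ≤ J →
    opAloopA p (PySem.List.pyRange (n - 1 - j) 0 (-1)) L (F j) ((j : Int) + 1) =
      (L ++ PySem.List.pyRange ((j : Int) + 2) ((J : Int) + 2) 1 ++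
        [p - F J - (n - 1 - J) + 1] ++ List.replicate (n - 2 - J).toNat 1, p) := by
  intro j
  induction hd : J - j generalizing j with
  | zero =>
    intro L hj
    have hjJ : j = J := by omega
    subst hjJ
    rw [PySem.List.pyRange_neg_one_cons (by omega)]
    rw [opAloopA]
    have hcond : p ≤ F j + ((j : Int) + 1 + 1) + (n - 1 - j) - 1 := by omega
    simp only [ge_iff_le, hcond, if_true]
    rw [PySem.List.pyRange_one_eq_nil (by omega)]
    have hrep : n - 1 - (j : Int) - 1 = n - 2 - j := by ring
    rw [hrep]
    simp [List.append_assoc]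
  | succ d ihd =>
    intro L hj
    have hjJ : j < J := by omega
    rw [PySem.List.pyRange_neg_one_cons (by omega)]
    rw [opAloopA]
    have hcond : ¬ (p ≤ F j + ((j : Int) + 1 + 1) + (n - 1 - j) - 1) := by
      have h1 := hmin j hjJ
      omega
    simp only [ge_iff_le, hcond, if_false]
    have hF : F j + ((j : Int) + 1 + 1) = F (j + 1) := by simp only [F]; omega
    have hrange : n - 1 - (j : Int) - 1 = n - 1 - ((j : Nat) + 1 : Nat) := by omega
    have hc1 : ((j : Int) + 1 + 1) = (((j : Nat) + 1 : Nat) : Int) + 1 := by omega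
    rw [hF, hrange, hc1, ihd (j + 1) (by omega) (L ++ [(((j : Nat) + 1 : Nat) : Int) + 1]) (by omega)]
    have hcons : PySem.List.pyRange ((j : Int) + 2) ((J : Int) + 2) 1 =
        ((j : Int) + 2) :: PySem.List.pyRange ((j : Int) + 2 + 1) ((J : Int) + 2) 1 :=
      PySem.List.pyRange_one_cons (by omega)
    have h1 : ((j : Int) + 2 + 1) = (((j + 1 : Nat)) : Int) + 2 := by omega
    have h2 : ((j : Int) + 2) = (((j + 1 : Nat)) : Int) + 1 := by omega
    rw [hcons, h1, h2]
    simp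

-- A's loop when the condition never fires: appends the whole range of c's and t ends at F (n-1)
theorem loopA_nobreak (n p : Int) (hn : 2 ≤ n) (hno : ∀ k : Nat, (k : Int) ≤ n - 2 → F k + n < p) :
    ∀ (j : Nat) (L : List Int), (j : Int) ≤ n - 1 →
    opAloopA p (PySem.List.pyRange (n - 1 - j) 0 (-1)) L (F j) ((j : Int) + 1) =
      (L ++ PySem.List.pyRange ((j : Int) + 2) (n + 1) 1, F (n - 1).toNat) := by
  intro j
  induction hd : (n - 1 - j).toNat generalizing j with
  | zero =>
    intro L hj
    have hjn : (j : Int) = n - 1 := by omega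
    rw [PySem.List.pyRange_neg_one_eq_nil (by omega)]
    rw [opAloopA]
    rw [PySem.List.pyRange_one_eq_nil (by omega)]
    have hj' : j = (n - 1).toNat := by omega
    rw [hj']
    simp
  | succ d ihd =>
    intro L hj
    rw [PySem.List.pyRange_neg_one_cons (by omega)]
    rw [opAloopA]
    have hcond : ¬ (p ≤ F j + ((j : Int) + 1 + 1) + (n - 1 - j) - 1) := by
      have h1 := hno j (by omega)
      omega
    simp only [ge_iff_le, hcond, if_false]
    have hF : F j + ((j : Int) + 1 + 1) = F (j + 1) := by simp only [F]; omega
    have hrange : n - 1 - (j : Int) - 1 = n - 1 - ((j : Nat) + 1 : Nat) := by omega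
    have hc1 : ((j : Int) + 1 + 1) = (((j : Nat) + 1 : Nat) : Int) + 1 := by omega
    rw [hF, hrange, hc1, ihd (j + 1) (by omega) (L ++ [(((j : Nat) + 1 : Nat) : Int) + 1]) (by omega)]
    have hcons : PySem.List.pyRange ((j : Int) + 2) (n + 1) 1 =
        ((j : Int) + 2) :: PySem.List.pyRange ((j : Int) + 2 + 1) (n + 1) 1 :=
      PySem.List.pyRange_one_cons (by omega)
    have h1 : ((j : Int) + 2 + 1) = (((j + 1 : Nat)) : Int) + 2 := by omega
    have h2 : ((j : Int) + 2) = (((j + 1 : Nat)) : Int) + 1 := by omega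
    rw [hcons, h1, h2]
    simp

theorem loopA_break0 (n p : Int) (J : Nat) (hJ : (J : Int) ≤ n - 2)
    (hbrk : p ≤ F J + n) (hmin : ∀ k : Nat, k < J → F k + n < p) :
    opAloopA p (PySem.List.pyRange (n - 1) 0 (-1)) [] 0 1 =
      (PySem.List.pyRange 2 ((J : Int) + 2) 1 ++
        [p - F J - (n - 1 - J) + 1] ++ List.replicate (n - 2 - J).toNat 1, p) := by
  have h := loopA_break n p J hJ hbrk hmin 0 [] (by omega)
  simpa [F] using h

theorem loopA_nobreak0 (n p : Int) (hn : 2 ≤ n) (hno : ∀ k : Nat, (k : Int) ≤ n - 2 → F k + n < p) :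
    opAloopA p (PySem.List.pyRange (n - 1) 0 (-1)) [] 0 1 =
      (PySem.List.pyRange 2 (n + 1) 1, F (n - 1).toNat) := by
  have h := loopA_nobreak n p hn hno 0 [] (by omega)
  simpa [F] using h

-- M = n*(n+1)//2 - 1 = F (n-1) for n ≥ 1
theorem guard_eq_F (n : Int) (hn : 0 ≤ n - 1) :
    PySem.Int.floordiv (n * (n + 1)) 2 - 1 = F (n - 1).toNat := by
  have h2 : 2 * F (n - 1).toNat = (n - 1) * (n + 2) := by
    have := two_mul_F (n - 1).toNat
    rw [Int.toNat_of_nonneg hn] at this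
    rw [this]; ring
  have h3 : n * (n + 1) = 2 * (F (n - 1).toNat + 1) := by nlinarith [h2]
  rw [PySem.Int.floordiv_eq_ediv_of_pos (by omega)]
  omega

-- F (n-2) + n = F (n-1) for n ≥ 2
theorem F_step_top (n : Int) (hn : 2 ≤ n) : F (n - 2).toNat + n = F (n - 1).toNat := by
  have h : (n - 1).toNat = (n - 2).toNat + 1 := by omega
  rw [h]; simp only [F]; omega

-- ===== VERDICT (by name: the statement is the Claim_ definition above) =====
theorem operationL_spec : Claim_equal_operationL := by
  unfold Claim_equal_operationL Spec_operationL
  intro n p _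
  unfold operationL operationL_alt
  by_cases hp : p < n - 1
  · simp [hp]
  · simp only [hp, if_false]
    by_cases hn : n < 2
    · rw [PySem.List.pyRange_neg_one_eq_nil (by omega)]
      simp only [opAloopA]
      rw [if_pos (Or.inl hn)]
      split <;> rfl
    · rw [Int.not_lt] at hn
      have hM := guard_eq_F n (by omega)
      have hstep := F_step_top n hn
      by_cases hbig : p > PySem.Int.floordiv (n*(n+1)) 2 - 1
      · rw [if_pos (Or.inr (Or.inr hbig))]
        have hno : ∀ k : Nat, (k : Int) ≤ n - 2 → F k + n < p := by
          intro k hk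
          have h1 : F k ≤ F (n - 2).toNat := F_mono (by omega)
          omega
        rw [loopA_nobreak0 n p hn hno]
        have hlt : F (n - 1).toNat < p := by omega
        show (if F (n - 1).toNat < p then ([] : List Int) else PySem.List.pyRange 2 (n + 1) 1) = []
        rw [if_pos hlt]
      · have hsp := opBsearch_spec (p - n) 0 (n - 2) le_rfl (by omega)
          (by omega) (Or.inl rfl)
        generalize hJdef : opBsearch (p - n) 0 (n - 2) = J at hsp ⊢
        obtain ⟨hJ0, hJle, hJbrk, hJmin⟩ := hsp
        have hcast : ((J.toNat : Int)) = J := Int.toNat_of_nonneg hJ0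
        have hmin : ∀ k : Nat, k < J.toNat → F k + n < p := by
          intro k hk
          rcases hJmin with h0 | hlt
          · omega
          · have h2 : F k ≤ F (J - 1).toNat := F_mono (by omega)
            omega
        have hrun := loopA_break0 n p J.toNat (by omega) (by omega) hmin
        rw [hcast] at hrun
        rw [hrun]
        rw [if_neg (show ¬ (n < 2 ∨ False ∨ p > PySem.Int.floordiv (n*(n+1)) 2 - 1) by
          rintro (h | h | h)
          · omega
          · exact h
          · omega)]
        have hlt : ¬ ((PySem.List.pyRange 2 (J + 2) 1 ++
            [p - F J.toNat - (n - 1 - J) + 1] ++ List.replicate (n - 2 - J).toNat 1, p).2 < p) := by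
          simp
        rw [if_neg hlt]
        rw [floordiv_G J hJ0]
        have hr : p - F J.toNat - (n - 1 - J) + 1 = p - J - (F J.toNat - 2*J) - n + 2 := by ring
        simp only [hr]
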